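-- pv_equiv track=rewrite | github.com/uk0/ultraworker | src/ultrawork/dashboard/server.py | _derive_thread_status
-- ===== SOURCE A (Python) =====
-- def _derive_thread_status(
--     session_statuses: list[str],
--     request_statuses: list[str],
-- ) -> str:
--     statuses = [str(status or "").lower() for status in session_statuses + request_statuses]
--     if any(status in {"active", "initializing", "running"} for status in statuses):
--         return "active"
--     if any(status in {"waiting_feedback", "waiting", "paused"} for status in statuses):
--         return "waiting"
--     if any(status in {"cancelled"} for status in statuses):
--         return "cancelled"
--     if any(status in {"failed", "error"} for status in statuses):
--         return "failed"
--     if statuses and all(status in {"completed", "success"} for status in statuses):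
--         return "completed"
--     return "pending"
-- ===== SOURCE B (Python) =====
-- def _derive_thread_status(
--     session_statuses: list[str],
--     request_statuses: list[str],
-- ) -> str:
--     seen = has_active = has_waiting = has_cancelled = has_failed = False
--     all_completed = True
--     for status in session_statuses + request_statuses:
--         s = str(status or "").lower()
--         seen = True
--         if s in ("active", "initializing", "running"):
--             has_active = True
--         if s in ("waiting_feedback", "waiting", "paused"):
--             has_waiting = True
--         if s == "cancelled":
--             has_cancelled = True
--         if s in ("failed", "error"):
--             has_failed = True
--         if s not in ("completed", "success"):
--             all_completed = False
--     if has_active: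
--         return "active"
--     if has_waiting:
--         return "waiting"
--     if has_cancelled:
--         return "cancelled"
--     if has_failed:
--         return "failed"
--     if seen and all_completed:
--         return "completed"
--     return "pending"
-- ===== Notes on version B (the rewrite author's own statement) =====
-- stated objective: alternative
-- what changed: Replaces the five separate any/all scans over a pre-built normalized list with a single accumulator loop that normalizes each status once and maintains boolean flags, deciding the result after the pass.
import Mathlib
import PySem

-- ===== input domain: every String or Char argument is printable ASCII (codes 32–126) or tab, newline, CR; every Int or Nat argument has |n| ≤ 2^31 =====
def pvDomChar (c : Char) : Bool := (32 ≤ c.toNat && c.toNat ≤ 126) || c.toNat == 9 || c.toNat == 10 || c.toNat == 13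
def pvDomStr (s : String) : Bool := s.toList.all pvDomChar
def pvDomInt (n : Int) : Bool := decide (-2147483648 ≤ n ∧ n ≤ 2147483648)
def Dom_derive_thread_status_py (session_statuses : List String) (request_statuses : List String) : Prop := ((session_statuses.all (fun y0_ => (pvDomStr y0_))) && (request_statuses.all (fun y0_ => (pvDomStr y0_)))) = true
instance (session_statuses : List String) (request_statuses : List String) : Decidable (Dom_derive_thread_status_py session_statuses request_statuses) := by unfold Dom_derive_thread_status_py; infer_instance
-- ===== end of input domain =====

-- ===== PORT A =====
-- A: build the lowered list, then five any/all membership scans in priority order.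
def derive_thread_status_py (session_statuses : List String) (request_statuses : List String) : String :=
  let statuses := (session_statuses ++ request_statuses).map (fun st => PySem.Str.lower st)
  if statuses.any (fun s => s == "active" || s == "initializing" || s == "running") then "active"
  else if statuses.any (fun s => s == "waiting_feedback" || s == "waiting" || s == "paused") then "waiting"
  else if statuses.any (fun s => s == "cancelled") then "cancelled"
  else if statuses.any (fun s => s == "failed" || s == "error") then "failed"
  else if (!statuses.isEmpty) && statuses.all (fun s => s == "completed" || s == "success") then "completed"
  else "pending"

-- ===== PORT B =====
-- B: one pass, normalizing each status once and accumulating flags; decide afterwards.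
def altLoop : List String → Bool × Bool × Bool × Bool × Bool × Bool → Bool × Bool × Bool × Bool × Bool × Bool
  | [], st => st
  | x :: xs, (_, a, w, c, f, ac) =>
    let s := PySem.Str.lower x
    altLoop xs (true,
      a || (s == "active" || s == "initializing" || s == "running"),
      w || (s == "waiting_feedback" || s == "waiting" || s == "paused"),
      c || (s == "cancelled"),
      f || (s == "failed" || s == "error"),
      ac && (s == "completed" || s == "success"))

def derive_thread_status_py_alt (session_statuses : List String) (request_statuses : List String) : String :=
  let (seen, a, w, c, f, ac) :=
    altLoop (session_statuses ++ request_statuses) (false, false, false, false, false, true)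
  if a then "active"
  else if w then "waiting"
  else if c then "cancelled"
  else if f then "failed"
  else if seen && ac then "completed"
  else "pending"

-- ===== PRECONDITION & SPEC =====
def Spec_derive_thread_status_py (session_statuses : List String) (request_statuses : List String) (out : String) : Prop := out = derive_thread_status_py_alt session_statuses request_statuses
instance (session_statuses : List String) (request_statuses : List String) (out : String) : Decidable (Spec_derive_thread_status_py session_statuses request_statuses out) := by unfold Spec_derive_thread_status_py; infer_instance

-- ===== CLAIM (what is proved, stated in full; the proofs are below) =====
def Claim_equal_derive_thread_status_py : Prop := ∀ (session_statuses : List String) (request_statuses : List String), Dom_derive_thread_status_py session_statuses request_statuses → Spec_derive_thread_status_py session_statuses request_statuses (derive_thread_status_py session_statuses request_statuses)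

-- ===== LEMMAS AND PROOFS =====

-- ===== VERDICT (by name: the statement is the Claim_ definition above) =====
lemma altLoop_inv (l : List String) (seen a w c f ac : Bool) :
    altLoop l (seen, a, w, c, f, ac) =
      (seen || !l.isEmpty,
       a || l.any (fun x => let s := PySem.Str.lower x; s == "active" || s == "initializing" || s == "running"),
       w || l.any (fun x => let s := PySem.Str.lower x; s == "waiting_feedback" || s == "waiting" || s == "paused"),
       c || l.any (fun x => PySem.Str.lower x == "cancelled"),
       f || l.any (fun x => let s := PySem.Str.lower x; s == "failed" || s == "error"),
       ac && l.all (fun x => let s := PySem.Str.lower x; s == "completed" || s == "success")) := by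
  induction l generalizing seen a w c f ac with
  | nil => simp [altLoop]
  | cons x xs ih =>
      simp only [altLoop, ih]
      simp [Bool.or_assoc, Bool.and_assoc]

theorem derive_thread_status_py_spec : Claim_equal_derive_thread_status_py := by
  intro ss rs _
  unfold Spec_derive_thread_status_py derive_thread_status_py derive_thread_status_py_alt
  simp [altLoop_inv, List.any_map, List.all_map, Function.comp]
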